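-- pv_equiv track=rewrite | github.com/dilawar/algorithms | Cluster/cluster.py | find_cluster_with_max_len
-- ===== SOURCE A (Python) =====
-- def find_cluster_with_max_len( vec ):
--     maxLen = max( [ x[2]['k'] for x in vec ] )
--     clusters, cluster, cid = [ ], [0,0], ''
--     clusterStart = False
--
--     for i, v in enumerate( vec ):
--         if not clusterStart and v[2]['k'] == maxLen:
--             clusterStart = True
--             cluster[0] = i
--         elif clusterStart and v[2]['k'] != maxLen:
--             cluster[1] = i
--             clusters.append( (v[0], cluster) )
--             cluster = [0,0]
--             clusterStart = False
--
--     for x,c in clusters: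
--         assert vec[c[0]][0] == vec[c[1]][0], [vec[i] for i in c]
--     return maxLen, clusters
-- ===== SOURCE B (Python) =====
-- def find_cluster_with_max_len(vec):
--     maxLen = max([x[2]['k'] for x in vec])
--     flags = [v[2]['k'] == maxLen for v in vec]
--     n = len(vec)
--     runs = []
--     i = 0
--     while i < n:
--         if flags[i]:
--             j = i + 1
--             while j < n and flags[j]:
--                 j += 1
--             runs.append((i, j))
--             i = j
--         else:
--             i += 1
--     clusters = [(vec[e][0], [s, e]) for (s, e) in runs if e < n]
--     for x, c in clusters:
--         assert vec[c[0]][0] == vec[c[1]][0], [vec[i] for i in c]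
--     return maxLen, clusters
-- ===== Notes on version B (the rewrite author's own statement) =====
-- stated objective: alternative
-- what changed: A's single stateful pass with a clusterStart flag and a mutable cluster cell is replaced by a two-phase decomposition: first extract the maximal runs of k == maxLen as (start, end) index pairs, then build the clusters from the runs that end strictly before len(vec), tagging each with vec[end][0].
import Mathlib
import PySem

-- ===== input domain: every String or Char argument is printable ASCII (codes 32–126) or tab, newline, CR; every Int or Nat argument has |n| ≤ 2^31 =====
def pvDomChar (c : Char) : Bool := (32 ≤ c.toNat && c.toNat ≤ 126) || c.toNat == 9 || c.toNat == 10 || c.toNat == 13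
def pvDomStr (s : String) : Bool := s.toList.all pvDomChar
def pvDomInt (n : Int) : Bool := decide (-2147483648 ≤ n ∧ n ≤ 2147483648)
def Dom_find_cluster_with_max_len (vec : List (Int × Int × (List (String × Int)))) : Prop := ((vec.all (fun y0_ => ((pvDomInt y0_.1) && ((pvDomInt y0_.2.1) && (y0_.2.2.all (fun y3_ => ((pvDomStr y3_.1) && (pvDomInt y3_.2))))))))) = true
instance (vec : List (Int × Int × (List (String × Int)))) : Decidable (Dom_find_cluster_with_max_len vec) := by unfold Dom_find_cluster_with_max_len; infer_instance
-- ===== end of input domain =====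

-- B replaces A's single stateful-flag pass by a two-phase decomposition: extract the
-- maximal runs of k == maxLen as (start, end) index pairs, then keep the runs that
-- end strictly before len(vec), tagged with vec[end][0].  Objective: alternative
-- decomposition (same cost).  Equivalence is about the return value; the asserts /
-- exceptions of both Pythons (empty vec, missing 'k' key, failing assert) are the
-- inputs excluded by Pre_.

-- shared helpers (used by both ports and by Pre_; they are not the ports)
-- d['k'] on the dict, first match; the KeyError case (missing key) is outside Pre_
def pvK (d : List (String × Int)) : Int := (List.lookup "k" d).getD 0
def pvDef : Int × Int × (List (String × Int)) := (0, 0, [])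
-- max(list) with no key; the ValueError case (empty vec) is outside Pre_
def pvMax (vec : List (Int × Int × (List (String × Int)))) : Int :=
  (PySem.List.max? (vec.map (fun x => pvK x.2.2)) (fun y => y)).getD 0

-- ===== PORT A =====
-- the loop body of A (clusters, cluster as a 2-field pair, clusterStart), literal
def stepA (maxLen : Int)
    (st : List (Int × List Int) × (Int × Int) × Bool)
    (iv : Int × (Int × Int × (List (String × Int)))) :
    List (Int × List Int) × (Int × Int) × Bool :=
  if !st.2.2 && (pvK iv.2.2.2 == maxLen) then
    -- clusterStart = True; cluster[0] = i
    (st.1, (iv.1, st.2.1.2), true)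
  else if st.2.2 && !(pvK iv.2.2.2 == maxLen) then
    -- cluster[1] = i; clusters.append((v[0], cluster)); cluster = [0,0]; clusterStart = False
    (st.1 ++ [(iv.2.1, [st.2.1.1, iv.1])], ((0 : Int), (0 : Int)), false)
  else st

def find_cluster_with_max_len (vec : List (Int × Int × (List (String × Int)))) : Int × (List (Int × List Int)) :=
  let maxLen := pvMax vec
  let res := (PySem.List.enumerate vec 0).foldl (stepA maxLen)
      (([] : List (Int × List Int)), ((0 : Int), (0 : Int)), false)
  -- the final Python `assert` loop can only raise (those inputs are outside Pre_);
  -- it never changes the returned value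
  (maxLen, res.1)

-- ===== PORT B =====
-- run extraction: the outer while-loop of B; the inner `while j < n and flags[j]` is
-- the leading-true prefix (takeWhile) and the jump `i = j` the matching dropWhile
def pvRunsB (bs : List Bool) (i : Int) : List (Int × Int) :=
  match bs with
  | [] => []
  | b :: rest =>
    if b then
      (i, i + 1 + ((rest.takeWhile (fun x => x)).length : Int))
        :: pvRunsB (rest.dropWhile (fun x => x)) (i + 1 + ((rest.takeWhile (fun x => x)).length : Int))
    else pvRunsB rest (i + 1)
termination_by bs.length
decreasing_by
  · simpa using Nat.lt_succ_of_le (List.length_dropWhile_le _ _)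
  · simp

def find_cluster_with_max_len_alt (vec : List (Int × Int × (List (String × Int)))) : Int × (List (Int × List Int)) :=
  let maxLen := pvMax vec
  let flags := vec.map (fun v => pvK v.2.2 == maxLen)
  let n : Int := vec.length
  let clusters := ((pvRunsB flags 0).filter (fun p => p.2 < n)).map
      (fun p => ((PySem.List.pyGetD vec p.2 pvDef).1, [p.1, p.2]))
  -- B's assert loop likewise only raises, outside Pre_
  (maxLen, clusters)

-- ===== PRECONDITION & SPEC =====
def pvFlag (vec : List (Int × Int × (List (String × Int)))) (j : Nat) : Bool :=
  pvK ((vec.getD j pvDef).2.2) == pvMax vec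
-- Pre_ excludes exactly the inputs on which Python A raises: empty vec (ValueError
-- from max), an element whose dict lacks the key 'k' (KeyError), and inputs where a
-- maximal run of k == maxLen closing at index e has vec[start][0] ≠ vec[e][0]
-- (AssertionError).  A returns on every other input.
def Pre_find_cluster_with_max_len (vec : List (Int × Int × (List (String × Int)))) : Prop :=
  vec ≠ [] ∧
  (∀ v ∈ vec, (List.lookup "k" v.2.2).isSome = true) ∧
  (∀ s, s < vec.length → ∀ e, e < vec.length →
    (s < e ∧ (∀ j, s ≤ j → j < e → pvFlag vec j = true) ∧ pvFlag vec e = false ∧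
      (s = 0 ∨ pvFlag vec (s - 1) = false)) →
    (vec.getD s pvDef).1 = (vec.getD e pvDef).1)
instance (vec : List (Int × Int × (List (String × Int)))) : Decidable (Pre_find_cluster_with_max_len vec) := by unfold Pre_find_cluster_with_max_len; infer_instance

def pvWitness_find_cluster_with_max_len : (List (Int × Int × (List (String × Int)))) :=
  [(5, 1, [("k", 2)]), (7, 2, [("k", 2)]), (5, 3, [("k", 1)])]

def Spec_find_cluster_with_max_len (vec : List (Int × Int × (List (String × Int)))) (out : Int × (List (Int × List Int))) : Prop := out = find_cluster_with_max_len_alt vec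
instance (vec : List (Int × Int × (List (String × Int)))) (out : Int × (List (Int × List Int))) : Decidable (Spec_find_cluster_with_max_len vec out) := by unfold Spec_find_cluster_with_max_len; infer_instance

-- ===== CLAIM (what is proved, stated in full; the proofs are below) =====
def Claim_equal_find_cluster_with_max_len : Prop := ∀ (vec : List (Int × Int × (List (String × Int)))), Dom_find_cluster_with_max_len vec → Pre_find_cluster_with_max_len vec → Spec_find_cluster_with_max_len vec (find_cluster_with_max_len vec)

-- ===== LEMMAS AND PROOFS =====

-- proof-side characterisation of A's fold: the clusters it accumulates, as a
-- structural recursion carrying only the optional open-run start index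
def recA (M : Int) : List (Int × Int × (List (String × Int))) → Int → Option Int → List (Int × List Int)
  | [], _, _ => []
  | v :: rest, i, none =>
      if pvK v.2.2 == M then recA M rest (i + 1) (some i) else recA M rest (i + 1) none
  | v :: rest, i, some s =>
      if pvK v.2.2 == M then recA M rest (i + 1) (some s)
      else (v.1, [s, i]) :: recA M rest (i + 1) none

lemma foldl_stepA_eq_recA (M : Int) :
    ∀ (l : List (Int × Int × (List (String × Int)))) (i : Int)
      (acc : List (Int × List Int)) (c1 c2 : Int) (st : Bool),
    ((PySem.List.enumerate l i).foldl (stepA M) (acc, (c1, c2), st)).1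
      = acc ++ recA M l i (if st then some c1 else none) := by
  intro l
  induction l with
  | nil => intro i acc c1 c2 st; cases st <;> simp [recA, PySem.List.enumerate_nil]
  | cons v rest ih =>
    intro i acc c1 c2 st
    rw [PySem.List.enumerate_cons, List.foldl_cons]
    cases st with
    | false =>
      by_cases h : (pvK v.2.2 == M) = true
      · simp [stepA, h, ih, recA]
      · simp at h
        simp [stepA, h, ih, recA]
    | true =>
      by_cases h : (pvK v.2.2 == M) = true
      · simp [stepA, h, ih, recA]
      · simp only [Bool.not_eq_true] at h
        simp [stepA, h, ih, recA]

-- closing behaviour of an open run: consume the leading flagged prefix; if the list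
-- ends before a non-flagged element appears, the open run is dropped
lemma recA_some (M : Int) :
    ∀ (l : List (Int × Int × (List (String × Int)))) (i s : Int),
    recA M l i (some s) =
      if _h : (l.takeWhile (fun v => pvK v.2.2 == M)).length < l.length then
        ((l.getD (l.takeWhile (fun v => pvK v.2.2 == M)).length pvDef).1,
          [s, i + ((l.takeWhile (fun v => pvK v.2.2 == M)).length : Int)])
          :: recA M (l.drop ((l.takeWhile (fun v => pvK v.2.2 == M)).length + 1))
              (i + ((l.takeWhile (fun v => pvK v.2.2 == M)).length : Int) + 1) none
      else [] := by
  intro l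
  induction l with
  | nil => intro i s; simp [recA]
  | cons v rest ih =>
    intro i s
    by_cases h : (pvK v.2.2 == M) = true
    · rw [recA, if_pos h, ih, List.takeWhile_cons, if_pos h]
      by_cases h2 : (rest.takeWhile (fun v => pvK v.2.2 == M)).length < rest.length
      · rw [dif_pos h2, dif_pos (by simpa using Nat.succ_lt_succ h2)]
        have e1 : (i + 1) + ((rest.takeWhile (fun v => pvK v.2.2 == M)).length : Int)
            = i + (((rest.takeWhile (fun v => pvK v.2.2 == M)).length + 1 : Nat) : Int) := by
          push_cast; ring
        simp only [List.length_cons, List.getD_cons_succ, List.drop_succ_cons, e1]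
      · rw [dif_neg h2, dif_neg (by simpa using h2)]
    · rw [recA, if_neg h, List.takeWhile_cons, if_neg h]
      rw [dif_pos (by simp)]
      simp

lemma dropWhile_eq_drop_length_takeWhile {α : Type} (p : α → Bool) :
    ∀ (l : List α), l.dropWhile p = l.drop (l.takeWhile p).length := by
  intro l
  induction l with
  | nil => simp
  | cons a t ih => by_cases h : p a = true <;> simp [h, ih]

lemma length_dropWhile_eq {α : Type} (p : α → Bool) (l : List α) :
    (l.dropWhile p).length = l.length - (l.takeWhile p).length := by
  rw [dropWhile_eq_drop_length_takeWhile]; simp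

lemma getD_drop {α : Type} (l : List α) (n m : Nat) (d : α) :
    (l.drop n).getD m d = l.getD (n + m) d := by
  simp [List.getD_eq_getElem?_getD, List.getElem?_drop]

lemma pvRunsB_bounds :
    ∀ (N : Nat) (bs : List Bool), bs.length ≤ N → ∀ (i : Int), ∀ p ∈ pvRunsB bs i,
      i ≤ p.1 ∧ p.1 < p.2 ∧ p.2 ≤ i + bs.length := by
  intro N
  induction N with
  | zero =>
    intro bs hl i p hp
    rw [List.length_eq_zero_iff.mp (Nat.le_zero.mp hl)] at hp
    simp [pvRunsB] at hp
  | succ N ih =>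
    intro bs hl i p hp
    cases bs with
    | nil => simp [pvRunsB] at hp
    | cons b rest =>
      by_cases hb : b = true
      · rw [pvRunsB, if_pos hb] at hp
        have ht : (rest.takeWhile (fun x => x)).length ≤ rest.length :=
          (List.takeWhile_sublist _).length_le
        rcases List.mem_cons.mp hp with h1 | h2
        · subst h1
          simp only [List.length_cons]
          constructor
          · omega
          constructor
          · have : (0 : Int) ≤ ((rest.takeWhile (fun x => x)).length : Int) := by positivity
            omega
          · push_cast; omega
        · have hlen : (rest.dropWhile (fun x => x)).length ≤ N := by
            have := List.length_dropWhile_le (fun x => x) rest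
            simp only [List.length_cons] at hl; omega
          have := ih _ hlen _ _ h2
          have hdw := length_dropWhile_eq (fun x => x) rest
          simp only [List.length_cons]
          push_cast at this ⊢
          omega
      · rw [pvRunsB, if_neg hb] at hp
        have := ih rest (by simp at hl; omega) (i + 1) p hp
        simp only [List.length_cons]
        push_cast at this ⊢
        omega

lemma takeWhile_boundary {α : Type} (p : α → Bool) :
    ∀ (l : List α) (d : α), (l.takeWhile p).length < l.length →
      p (l.getD (l.takeWhile p).length d) = false := by
  intro l
  induction l with
  | nil => intro d h; simp at h
  | cons a t ih =>
    intro d h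
    by_cases hp : p a = true
    · rw [List.takeWhile_cons, if_pos hp] at h ⊢
      simp only [List.length_cons, List.getD_cons_succ]
      exact ih d (by simpa using h)
    · simp only [Bool.not_eq_true] at hp
      rw [List.takeWhile_cons, if_neg (by simp [hp])] at h ⊢
      simpa using hp

lemma drop_eq_getD_cons {α : Type} (l : List α) (t : Nat) (d : α) (h : t < l.length) :
    l.drop t = l.getD t d :: l.drop (t + 1) := by
  rw [List.drop_eq_getElem_cons h, List.getD_eq_getElem?_getD, List.getElem?_eq_getElem h]
  rfl

lemma recA_none_eq_runs (M : Int) :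
    ∀ (N : Nat) (l : List (Int × Int × (List (String × Int)))), l.length ≤ N → ∀ (i : Int),
    recA M l i none =
      ((pvRunsB (l.map (fun v => pvK v.2.2 == M)) i).filter (fun p => p.2 < i + l.length)).map
        (fun p => ((PySem.List.pyGetD l (p.2 - i) pvDef).1, [p.1, p.2])) := by
  intro N
  induction N with
  | zero =>
    intro l hl i
    rw [List.length_eq_zero_iff.mp (Nat.le_zero.mp hl)]
    simp [recA, pvRunsB]
  | succ N ih =>
    intro l hl i
    cases l with
    | nil => simp [recA, pvRunsB]
    | cons v rest =>
      simp only [List.length_cons] at hl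
      by_cases h : (pvK v.2.2 == M) = true
      · -- the first element is flagged: a run opens at i
        rw [recA, if_pos h, recA_some]
        rw [List.map_cons, pvRunsB, if_pos h]
        have htw : (List.map (fun v => pvK v.2.2 == M) rest).takeWhile (fun x => x)
            = (rest.takeWhile (fun v => pvK v.2.2 == M)).map (fun v => pvK v.2.2 == M) := by
          rw [List.takeWhile_map]
          rfl
        have hdw : (List.map (fun v => pvK v.2.2 == M) rest).dropWhile (fun x => x)
            = (rest.dropWhile (fun v => pvK v.2.2 == M)).map (fun v => pvK v.2.2 == M) := by
          rw [List.dropWhile_map]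
          rfl
        rw [htw, hdw, List.length_map, dropWhile_eq_drop_length_takeWhile]
        set t := (rest.takeWhile (fun v => pvK v.2.2 == M)).length with hts
        have ht_le : t ≤ rest.length := (List.takeWhile_sublist _).length_le
        by_cases h2 : t < rest.length
        · rw [dif_pos h2]
          have hb : (pvK (rest.getD t pvDef).2.2 == M) = false := by
            simpa using takeWhile_boundary (fun v => pvK v.2.2 == M) rest pvDef h2
          rw [drop_eq_getD_cons rest t pvDef h2, List.map_cons, pvRunsB,
            if_neg (by simp only [List.getD_eq_getElem?_getD] at hb; simpa using hb)]
          rw [List.filter_cons,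
            if_pos (by simp only [decide_eq_true_eq, List.length_cons]; push_cast; omega)]
          rw [List.map_cons]
          have hidx : i + 1 + (t : Int) - i = ((t + 1 : Nat) : Int) := by push_cast; ring
          rw [hidx, PySem.List.pyGetD_natCast]
          simp only [List.getD_cons_succ]
          congr 1
          rw [ih (rest.drop (t + 1)) (by simp [List.length_drop]; omega) (i + 1 + (t : Int) + 1)]
          have hbound : (i + 1 + (t : Int) + 1) + ((rest.drop (t + 1)).length : Int)
              = i + (((v :: rest).length : Nat) : Int) := by
            rw [List.length_drop]
            simp only [List.length_cons]
            push_cast [Nat.cast_sub (show t + 1 ≤ rest.length by omega)]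
            ring
          rw [hbound]
          apply List.map_congr_left
          intro p hp
          have hpm := List.mem_filter.mp hp
          have hbd := pvRunsB_bounds ((rest.drop (t + 1)).map (fun v => pvK v.2.2 == M)).length
            _ le_rfl _ p hpm.1
          obtain ⟨hb1, hb2, _⟩ := hbd
          have hk0 : (0 : Int) ≤ p.2 - (i + 1 + (t : Int) + 1) := by omega
          set k := (p.2 - (i + 1 + (t : Int) + 1)).toNat with hks
          have hk : p.2 - (i + 1 + (t : Int) + 1) = (k : Int) := (Int.toNat_of_nonneg hk0).symm
          have hk2 : p.2 - i = ((k + t + 2 : Nat) : Int) := by push_cast; omega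
          rw [hk, hk2, PySem.List.pyGetD_natCast, PySem.List.pyGetD_natCast]
          rw [getD_drop]
          rw [show k + t + 2 = (k + t + 1) + 1 from by omega]
          simp only [List.getD_cons_succ]
          rw [show t + 1 + k = k + t + 1 from by omega]
        · rw [dif_neg h2]
          have hteq : t = rest.length := by omega
          rw [List.drop_of_length_le (by omega), List.map_nil]
          rw [List.filter_cons,
            if_neg (by simp only [decide_eq_true_eq, List.length_cons]; push_cast; omega)]
          simp [pvRunsB]
      · -- the first element is not flagged: skip it
        rw [recA, if_neg h, List.map_cons, pvRunsB, if_neg h]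
        rw [ih rest (by omega) (i + 1)]
        have hbound : (i + 1) + (rest.length : Int) = i + (((v :: rest).length : Nat) : Int) := by
          simp only [List.length_cons]; push_cast; ring
        rw [hbound]
        apply List.map_congr_left
        intro p hp
        have hpm := List.mem_filter.mp hp
        have hbd := pvRunsB_bounds (rest.map (fun v => pvK v.2.2 == M)).length _ le_rfl _ p hpm.1
        obtain ⟨hb1, hb2, _⟩ := hbd
        have hk0 : (0 : Int) ≤ p.2 - (i + 1) := by omega
        set k := (p.2 - (i + 1)).toNat with hks
        have hk : p.2 - (i + 1) = (k : Int) := (Int.toNat_of_nonneg hk0).symm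
        have hk2 : p.2 - i = ((k + 1 : Nat) : Int) := by push_cast; omega
        rw [hk, hk2, PySem.List.pyGetD_natCast, PySem.List.pyGetD_natCast]
        simp only [List.getD_cons_succ]

-- ===== VERDICT (by name: the statement is the Claim_ definition above) =====
theorem find_cluster_with_max_len_spec : Claim_equal_find_cluster_with_max_len := by
  intro vec _ _
  unfold Spec_find_cluster_with_max_len
  show (pvMax vec,
      ((PySem.List.enumerate vec 0).foldl (stepA (pvMax vec))
        (([] : List (Int × List Int)), ((0 : Int), (0 : Int)), false)).1)
    = find_cluster_with_max_len_alt vec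
  rw [foldl_stepA_eq_recA]
  rw [if_neg (by simp), List.nil_append]
  rw [recA_none_eq_runs (pvMax vec) vec.length vec le_rfl 0]
  show _ = (pvMax vec,
      ((pvRunsB (vec.map (fun v => pvK v.2.2 == pvMax vec)) 0).filter
          (fun p => p.2 < (vec.length : Int))).map
        (fun p => ((PySem.List.pyGetD vec p.2 pvDef).1, [p.1, p.2])))
  simp
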